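-- pv_equiv track=rewrite | github.com/valek77/pyflowetl_repo | src/pyflowetl/validators/codice_fiscale.py | _calcola_codice_controllo
-- ===== SOURCE A (Python) =====
-- def _calcola_codice_controllo(codice: str) -> str:
--     dispari = {
--         **{ch: val for ch, val in zip("0123456789", [1, 0, 5, 7, 9, 13, 15, 17, 19, 21])},
--         **{ch: val for ch, val in zip("ABCDEFGHIJKLMNOPQRSTUVWXYZ",
--                                       [1, 0, 5, 7, 9, 13, 15, 17, 19, 21,
--                                        2, 4, 18, 20, 11, 3, 6, 8, 12, 14,
--                                        16, 10, 22, 25, 24, 23])}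
--     }
--
--     pari = {
--         **{ch: int(ch) for ch in "0123456789"},
--         **{ch: ord(ch) - ord('A') for ch in "ABCDEFGHIJKLMNOPQRSTUVWXYZ"}
--     }
--
--     somma = 0
--     for i, ch in enumerate(codice):
--         somma += dispari[ch] if i % 2 == 0 else pari[ch]
--
--     return chr((somma % 26) + ord('A'))
-- ===== SOURCE B (Python) =====
-- # Weight applied at odd (1-based) positions to a character's rank: _ODD[rank].
-- _ODD = (1, 0, 5, 7, 9, 13, 15, 17, 19, 21,
--         2, 4, 18, 20, 11, 3, 6, 8, 12, 14,
--         16, 10, 22, 25, 24, 23)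
--
--
-- def _rank(ch):
--     # digit -> its value, uppercase letter -> alphabet index; both tables of A
--     # assign values through exactly this rank.
--     return ord(ch) - 48 if ch <= '9' else ord(ch) - 65
--
--
-- def _go(rest):
--     # consume the code two characters at a time: odd position weighted via
--     # _ODD, even position counts its plain rank.
--     if not rest:
--         return 0
--     if len(rest) == 1:
--         return _ODD[_rank(rest[0])]
--     return _ODD[_rank(rest[0])] + _rank(rest[1]) + _go(rest[2:])
--
--
-- def _calcola_codice_controllo(codice: str) -> str:
--     return chr(_go(codice) % 26 + 65)
-- ===== Notes on version B (the rewrite author's own statement) =====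
-- stated objective: alternative
-- what changed: The two 36-entry dictionaries and the enumerate loop with a parity branch are gone: B computes each character's rank by ordinal arithmetic, reads the odd-position weight from a single 26-entry tuple indexed by that rank (A's dispari table is exactly that value list applied through the rank), and consumes the string recursively two characters per step, so no parity test is needed.
import Mathlib
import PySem

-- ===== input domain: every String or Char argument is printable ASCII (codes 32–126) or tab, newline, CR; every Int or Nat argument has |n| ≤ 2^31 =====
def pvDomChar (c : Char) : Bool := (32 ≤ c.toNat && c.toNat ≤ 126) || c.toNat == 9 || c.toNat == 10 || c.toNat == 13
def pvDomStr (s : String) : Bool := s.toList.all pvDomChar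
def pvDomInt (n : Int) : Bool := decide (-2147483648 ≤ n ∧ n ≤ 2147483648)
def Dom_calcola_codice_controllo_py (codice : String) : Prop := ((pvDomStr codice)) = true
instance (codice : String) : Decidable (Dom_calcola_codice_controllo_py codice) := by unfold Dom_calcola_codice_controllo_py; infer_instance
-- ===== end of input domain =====

-- B drops A's two lookup dictionaries and its enumerate loop with a parity branch: it ranks
-- characters by ordinal arithmetic, weights odd positions through one 26-entry table indexed by
-- rank, and recurses over the string two characters at a time (alternative decomposition).


-- ===== PORT A =====
-- dispari = {**zip("0123456789", …), **zip("ABC…Z", …)}  (disjoint keys, so the merge is the concatenated association list)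
def pvDispari : PySem.Dict Char Int :=
  PySem.Dict.ofList
    (List.zip "0123456789".toList [1, 0, 5, 7, 9, 13, 15, 17, 19, 21] ++
     List.zip "ABCDEFGHIJKLMNOPQRSTUVWXYZ".toList
       [1, 0, 5, 7, 9, 13, 15, 17, 19, 21,
        2, 4, 18, 20, 11, 3, 6, 8, 12, 14,
        16, 10, 22, 25, 24, 23])

-- pari = {ch: int(ch) for digits} ∪ {ch: ord(ch)-ord('A') for letters}; int(ch) of one digit = ord(ch)-ord('0')
def pvPari : PySem.Dict Char Int :=
  PySem.Dict.ofList
    ("0123456789".toList.map (fun c => (c, ((c.toNat : Int) - 48))) ++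
     "ABCDEFGHIJKLMNOPQRSTUVWXYZ".toList.map (fun c => (c, ((c.toNat : Int) - 65))))

-- the for-loop: index counter i, accumulator somma; dispari[ch]/pari[ch] raise KeyError on a
-- char outside the tables — those inputs are excluded by Pre_ below, getD's default is never read there
def pvLoopA (somma : Int) (i : Int) : List Char → Int
  | [] => somma
  | ch :: t =>
      pvLoopA (somma + if PySem.Int.mod i 2 = 0 then pvDispari.getD ch 0 else pvPari.getD ch 0) (i + 1) t

def calcola_codice_controllo_py (codice : String) : String :=
  let somma := pvLoopA 0 0 codice.toList
  String.ofList [Char.ofNat (PySem.Int.mod somma 26 + 65).toNat]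

-- ===== PORT B =====
-- _ODD tuple
def pvODD : List Int :=
  [1, 0, 5, 7, 9, 13, 15, 17, 19, 21,
   2, 4, 18, 20, 11, 3, 6, 8, 12, 14,
   16, 10, 22, 25, 24, 23]

-- _rank: ord arithmetic, digit vs letter decided by ch <= '9'
def pvRank (ch : Char) : Int :=
  if ch ≤ '9' then (ch.toNat : Int) - 48 else (ch.toNat : Int) - 65

-- _ODD[_rank ch]: Python tuple indexing raises IndexError out of range; Pre_ below keeps the
-- rank inside 0..25, so the default 0 of getD is never read there
def pvOddW (ch : Char) : Int := (PySem.List.pyGet? pvODD (pvRank ch)).getD 0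

-- _go: pairwise recursion, odd position weighted, even position plain rank
def pvGo : List Char → Int
  | [] => 0
  | [a] => pvOddW a
  | a :: b :: t => pvOddW a + pvRank b + pvGo t

def calcola_codice_controllo_py_alt (codice : String) : String :=
  String.ofList [Char.ofNat (PySem.Int.mod (pvGo codice.toList) 26 + 65).toNat]

-- ===== PRECONDITION & SPEC =====
-- Pre_: every character of codice is a key of both of A's tables (digit or upper-case letter);
-- on any other char the Python A raises KeyError.
def Pre_calcola_codice_controllo_py (codice : String) : Prop :=
  codice.toList.all (fun c => "0123456789ABCDEFGHIJKLMNOPQRSTUVWXYZ".toList.contains c) = true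
instance (codice : String) : Decidable (Pre_calcola_codice_controllo_py codice) := by
  unfold Pre_calcola_codice_controllo_py; infer_instance
def pvWitness_calcola_codice_controllo_py : String := "RSSMRA85T10A562"

def Spec_calcola_codice_controllo_py (codice : String) (out : String) : Prop := out = calcola_codice_controllo_py_alt codice
instance (codice : String) (out : String) : Decidable (Spec_calcola_codice_controllo_py codice out) := by unfold Spec_calcola_codice_controllo_py; infer_instance

-- ===== CLAIM (what is proved, stated in full; the proofs are below) =====
def Claim_equal_calcola_codice_controllo_py : Prop := ∀ (codice : String), Dom_calcola_codice_controllo_py codice → Pre_calcola_codice_controllo_py codice → Spec_calcola_codice_controllo_py codice (calcola_codice_controllo_py codice)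

-- ===== LEMMAS AND PROOFS =====

def pvValid (c : Char) : Bool := "0123456789ABCDEFGHIJKLMNOPQRSTUVWXYZ".toList.contains c

-- on valid chars, A's dispari lookup is B's weighted rank and A's pari lookup is B's rank
set_option maxRecDepth 10000 in
theorem pvDispari_eq (c : Char) (h : pvValid c = true) : pvDispari.getD c 0 = pvOddW c := by
  have hall : ("0123456789ABCDEFGHIJKLMNOPQRSTUVWXYZ".toList.all
      (fun x => pvDispari.getD x 0 == pvOddW x)) = true := by decide
  have hmem : c ∈ "0123456789ABCDEFGHIJKLMNOPQRSTUVWXYZ".toList := by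
    simpa [pvValid, List.contains_iff_mem] using h
  exact beq_iff_eq.mp (List.all_eq_true.mp hall c hmem)

set_option maxRecDepth 10000 in
theorem pvPari_eq (c : Char) (h : pvValid c = true) : pvPari.getD c 0 = pvRank c := by
  have hall : ("0123456789ABCDEFGHIJKLMNOPQRSTUVWXYZ".toList.all
      (fun x => pvPari.getD x 0 == pvRank x)) = true := by decide
  have hmem : c ∈ "0123456789ABCDEFGHIJKLMNOPQRSTUVWXYZ".toList := by
    simpa [pvValid, List.contains_iff_mem] using h
  exact beq_iff_eq.mp (List.all_eq_true.mp hall c hmem)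

-- A's alternating loop, started at an even index, equals B's pairwise recursion
theorem pvLoopA_eq_go (l : List Char) : ∀ (somma i : Int),
    l.all pvValid = true → PySem.Int.mod i 2 = 0 →
    pvLoopA somma i l = somma + pvGo l := by
  induction l using pvGo.induct with
  | case1 => intro somma i _ _; simp [pvLoopA, pvGo]
  | case2 a =>
    intro somma i hv he
    simp only [List.all_cons, List.all_nil, Bool.and_true] at hv
    rw [pvLoopA, if_pos he]
    simp [pvLoopA, pvGo, pvDispari_eq a hv]
  | case3 a b t ih =>
    intro somma i hv he
    simp only [List.all_cons, Bool.and_eq_true] at hv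
    obtain ⟨ha, hb, ht⟩ := hv
    have hm : PySem.Int.mod i 2 = i % 2 := PySem.Int.mod_eq_emod_of_pos (by norm_num)
    have hm1 : PySem.Int.mod (i + 1) 2 = (i + 1) % 2 := PySem.Int.mod_eq_emod_of_pos (by norm_num)
    have hm2 : PySem.Int.mod (i + 1 + 1) 2 = (i + 1 + 1) % 2 := PySem.Int.mod_eq_emod_of_pos (by norm_num)
    rw [hm] at he
    have h1 : PySem.Int.mod (i + 1) 2 ≠ 0 := by rw [hm1]; omega
    have h2 : PySem.Int.mod (i + 1 + 1) 2 = 0 := by rw [hm2]; omega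
    rw [pvLoopA, if_pos (by rw [hm]; exact he), pvLoopA, if_neg h1,
        ih _ _ ht h2, pvDispari_eq a ha, pvPari_eq b hb, pvGo]
    ring

-- ===== VERDICT (by name: the statement is the Claim_ definition above) =====
theorem calcola_codice_controllo_py_spec : Claim_equal_calcola_codice_controllo_py := by
  intro codice _ hpre
  unfold Spec_calcola_codice_controllo_py calcola_codice_controllo_py calcola_codice_controllo_py_alt
  rw [pvLoopA_eq_go codice.toList 0 0 hpre (by decide)]
  norm_num
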